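-- pv_equiv track=rewrite | github.com/iqbash1/hawaiidashboard | scripts/build_public_health_ypll75_rate_per_100k.py | pick_rate_col
-- ===== SOURCE A (Python) =====
-- def pick_rate_col(headers):
--     # Prefer age-adjusted YPLL rate columns
--     keys = [h.strip() for h in headers]
--     # Rank candidates
--     prefs = [
--         "age-adjusted ypll rate", "age adjusted ypll rate", "ypll rate age-adjusted",
--         "age-adjusted rate", "age adjusted rate", "ypll rate", "rate"
--     ]
--     kl = [k.lower() for k in keys]
--     for p in prefs:
--         for i,h in enumerate(kl):
--             if p in h and "per" in h and "100" in h: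
--                 return keys[i]
--     # fallback: any header containing "rate"
--     for i,h in enumerate(kl):
--         if "rate" in h:
--             return keys[i]
--     return None
-- ===== SOURCE B (Python) =====
-- def pick_rate_col(headers):
--     prefs = [
--         "age-adjusted ypll rate", "age adjusted ypll rate", "ypll rate age-adjusted",
--         "age-adjusted rate", "age adjusted rate", "ypll rate", "rate"
--     ]
--     keys = [h.strip() for h in headers]
--     best = None  # (pref rank, stripped key); first header with strictly smaller rank wins
--     for k in keys:
--         h = k.lower()
--         if "per" in h and "100" in h:
--             for r, p in enumerate(prefs):
--                 if p in h:
--                     if best is None or r < best[0]: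
--                         best = (r, k)
--                     break
--     if best is not None:
--         return best[1]
--     return next((k for k in keys if "rate" in k.lower()), None)
-- ===== Notes on version B (the rewrite author's own statement) =====
-- stated objective: alternative
-- what changed: Replaces the prefs-outer/headers-inner nested early-return scan by a single pass over the headers that keeps a running best (pref-rank, key) pair with strict-less comparison (first minimal wins), plus a find-first fallback.
import Mathlib
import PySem

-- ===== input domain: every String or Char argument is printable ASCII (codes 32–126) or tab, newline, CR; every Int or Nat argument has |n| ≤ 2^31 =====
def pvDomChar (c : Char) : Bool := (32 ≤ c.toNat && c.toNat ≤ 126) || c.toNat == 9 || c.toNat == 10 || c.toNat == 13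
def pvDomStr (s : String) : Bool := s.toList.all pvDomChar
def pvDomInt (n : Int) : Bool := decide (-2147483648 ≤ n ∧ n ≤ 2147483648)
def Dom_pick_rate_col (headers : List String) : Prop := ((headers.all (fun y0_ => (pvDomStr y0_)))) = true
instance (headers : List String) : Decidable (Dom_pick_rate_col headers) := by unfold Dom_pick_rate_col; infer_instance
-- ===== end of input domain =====

-- B replaces A's prefs-outer/headers-inner nested early-return scan by a single pass over the
-- headers keeping a running best (pref-rank, key) pair; same result, stated objective: alternative.

def pvPrefs : List String :=
  ["age-adjusted ypll rate", "age adjusted ypll rate", "ypll rate age-adjusted",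
   "age-adjusted rate", "age adjusted rate", "ypll rate", "rate"]

-- ===== PORT A =====
-- inner 'for i,h in enumerate(kl): if p in h and "per" in h and "100" in h: return keys[i]'
def pvAScan (p : String) : List (String × String) → Option String
  | [] => none
  | (k, h) :: rest =>
    if PySem.Str.isIn p h && PySem.Str.isIn "per" h && PySem.Str.isIn "100" h then some k
    else pvAScan p rest

-- outer 'for p in prefs: …'
def pvAPrefLoop : List String → List (String × String) → Option String
  | [], _ => none
  | p :: ps, z =>
    match pvAScan p z with
    | some k => some k
    | none => pvAPrefLoop ps z

-- fallback 'for i,h in enumerate(kl): if "rate" in h: return keys[i]'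
def pvAFallback : List (String × String) → Option String
  | [] => none
  | (k, h) :: rest => if PySem.Str.isIn "rate" h then some k else pvAFallback rest

def pick_rate_col (headers : List String) : Option String :=
  let keys := headers.map PySem.Str.strip
  let kl := keys.map PySem.Str.lower
  match pvAPrefLoop pvPrefs (keys.zip kl) with
  | some k => some k
  | none => pvAFallback (keys.zip kl)

-- ===== PORT B =====
-- 'for r, p in enumerate(prefs): if p in h: … break' — the rank of the first matching pref
def pvBRank (prefs : List String) (h : String) : Option Nat :=
  match prefs with
  | [] => none
  | p :: ps => if PySem.Str.isIn p h then some 0 else (pvBRank ps h).map (· + 1)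

-- per-header key: rank if the per/100 gate holds, else none
def pvFKey (prefs : List String) (k : String) : Option Nat :=
  if PySem.Str.isIn "per" (PySem.Str.lower k) && PySem.Str.isIn "100" (PySem.Str.lower k) then
    pvBRank prefs (PySem.Str.lower k)
  else none

-- loop body: keep best (rank, key), strictly smaller rank replaces
def pvBStep (prefs : List String) (best : Option (Nat × String)) (k : String) : Option (Nat × String) :=
  match pvFKey prefs k with
  | none => best
  | some r =>
    match best with
    | none => some (r, k)
    | some (r0, _) => if r < r0 then some (r, k) else best

def pick_rate_col_alt (headers : List String) : Option String :=
  let keys := headers.map PySem.Str.strip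
  match keys.foldl (pvBStep pvPrefs) none with
  | some (_, k) => some k
  | none => keys.find? (fun k => PySem.Str.isIn "rate" (PySem.Str.lower k))

-- ===== PRECONDITION & SPEC =====
def Spec_pick_rate_col (headers : List String) (out : Option String) : Prop := out = pick_rate_col_alt headers
instance (headers : List String) (out : Option String) : Decidable (Spec_pick_rate_col headers out) := by unfold Spec_pick_rate_col; infer_instance

-- ===== CLAIM (what is proved, stated in full; the proofs are below) =====
def Claim_equal_pick_rate_col : Prop := ∀ (headers : List String), Dom_pick_rate_col headers → Spec_pick_rate_col headers (pick_rate_col headers)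

-- ===== LEMMAS AND PROOFS =====

-- the condition A's inner scan tests, phrased on the key alone
def pvCond (p k : String) : Bool :=
  PySem.Str.isIn "per" (PySem.Str.lower k) && PySem.Str.isIn "100" (PySem.Str.lower k)
    && PySem.Str.isIn p (PySem.Str.lower k)

lemma pvZipSelf (ks : List String) :
    ks.zip (ks.map PySem.Str.lower) = ks.map (fun k => (k, PySem.Str.lower k)) := by
  induction ks with
  | nil => rfl
  | cons k t ih => simp [ih]

lemma pvAScan_eq_find (p : String) (ks : List String) :
    pvAScan p (ks.map (fun k => (k, PySem.Str.lower k))) = ks.find? (pvCond p) := by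
  induction ks with
  | nil => rfl
  | cons k t ih =>
    simp only [List.map_cons, pvAScan, List.find?]
    have h : (PySem.Str.isIn p (PySem.Str.lower k) && PySem.Str.isIn "per" (PySem.Str.lower k)
        && PySem.Str.isIn "100" (PySem.Str.lower k)) = pvCond p k := by
      unfold pvCond
      cases PySem.Str.isIn p (PySem.Str.lower k) <;>
        cases PySem.Str.isIn "per" (PySem.Str.lower k) <;>
        cases PySem.Str.isIn "100" (PySem.Str.lower k) <;> rfl
    rw [h]
    cases hc : pvCond p k <;> simp [ih]

lemma pvAFallback_eq_find (ks : List String) :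
    pvAFallback (ks.map (fun k => (k, PySem.Str.lower k))) =
      ks.find? (fun k => PySem.Str.isIn "rate" (PySem.Str.lower k)) := by
  induction ks with
  | nil => rfl
  | cons k t ih =>
    simp only [List.map_cons, pvAFallback, List.find?]
    cases h : PySem.Str.isIn "rate" (PySem.Str.lower k) <;> simp [ih]

lemma pvBRank_cons (p : String) (ps : List String) (h : String) :
    pvBRank (p :: ps) h = if PySem.Str.isIn p h then some 0 else (pvBRank ps h).map (· + 1) :=
  rfl

lemma pvFKey_nil (k : String) : pvFKey [] k = none := by
  unfold pvFKey
  split <;> rfl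

lemma pvFKey_cons (p : String) (ps : List String) (k : String) :
    pvFKey (p :: ps) k = if pvCond p k then some 0 else (pvFKey ps k).map (· + 1) := by
  unfold pvFKey pvCond
  rw [pvBRank_cons]
  cases hg : PySem.Str.isIn "per" (PySem.Str.lower k) && PySem.Str.isIn "100" (PySem.Str.lower k)
  · simp
  · cases hp : PySem.Str.isIn p (PySem.Str.lower k) <;> simp

-- once best has rank 0 it never changes
lemma pvFold_keep_zero (ps : List String) (ks : List String) (k : String) :
    ks.foldl (pvBStep ps) (some (0, k)) = some (0, k) := by
  induction ks with
  | nil => rfl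
  | cons k' t ih =>
    have hstep : pvBStep ps (some (0, k)) k' = some (0, k) := by
      unfold pvBStep
      cases pvFKey ps k' with
      | none => rfl
      | some r => simp
    simp [List.foldl, hstep, ih]

-- folding with the empty pref list does nothing
lemma pvFold_nil (ks : List String) (b : Option (Nat × String)) :
    ks.foldl (pvBStep []) b = b := by
  induction ks generalizing b with
  | nil => rfl
  | cons k t ih => simp [List.foldl, pvBStep, pvFKey_nil, ih]

def pvShift : Option (Nat × String) → Option (Nat × String) :=
  Option.map (fun rk => (rk.1 + 1, rk.2))

-- no header matches pref p: the (p :: ps)-fold is the shifted ps-fold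
lemma pvFold_shift (p : String) (ps : List String) (ks : List String)
    (h : ∀ k ∈ ks, pvCond p k = false) (b : Option (Nat × String)) :
    ks.foldl (pvBStep (p :: ps)) (pvShift b) = pvShift (ks.foldl (pvBStep ps) b) := by
  induction ks generalizing b with
  | nil => rfl
  | cons k t ih =>
    have hk : pvCond p k = false := h k (by simp)
    have hstep : pvBStep (p :: ps) (pvShift b) k = pvShift (pvBStep ps b k) := by
      unfold pvBStep
      rw [pvFKey_cons, hk]
      simp only [Bool.false_eq_true, if_false]
      cases hK : pvFKey ps k with
      | none => simp
      | some r =>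
        cases b with
        | none => simp [pvShift]
        | some rk =>
          rcases rk with ⟨r0, k0⟩
          by_cases hlt : r < r0 <;> simp [pvShift, hlt]
    simp only [List.foldl, hstep]
    exact ih (fun x hx => h x (by simp [hx])) _
-- some header matches pref p: the (p :: ps)-fold ends at the first such header, rank 0
lemma pvFold_zero (p : String) (ps : List String) (ks : List String) (k0 : String)
    (hfind : ks.find? (pvCond p) = some k0) (b : Option (Nat × String))
    (hb : b = none ∨ ∃ r0 s0, b = some (r0, s0) ∧ 0 < r0) :
    ks.foldl (pvBStep (p :: ps)) b = some (0, k0) := by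
  induction ks generalizing b with
  | nil => simp at hfind
  | cons k t ih =>
    rw [List.find?] at hfind
    cases hc : pvCond p k with
    | true =>
      rw [hc] at hfind
      simp at hfind
      subst hfind
      have hstep : pvBStep (p :: ps) b k = some (0, k) := by
        unfold pvBStep
        rw [pvFKey_cons, hc, if_pos rfl]
        rcases hb with rfl | ⟨r0, s0, rfl, hr0⟩
        · rfl
        · simp [hr0]
      simp only [List.foldl, hstep]
      exact pvFold_keep_zero _ _ _
    | false =>
      rw [hc] at hfind
      simp only [] at hfind
      have hinv : pvBStep (p :: ps) b k = none ∨
          ∃ r0 s0, pvBStep (p :: ps) b k = some (r0, s0) ∧ 0 < r0 := by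
        unfold pvBStep
        rw [pvFKey_cons, hc]
        simp only [Bool.false_eq_true, if_false]
        cases hK : pvFKey ps k with
        | none => exact hb
        | some r =>
          rcases hb with rfl | ⟨r0, s0, rfl, hr0⟩
          · exact Or.inr ⟨r + 1, k, rfl, Nat.succ_pos r⟩
          · by_cases hlt : r + 1 < r0
            · exact Or.inr ⟨r + 1, k, by simp [hlt], Nat.succ_pos r⟩
            · exact Or.inr ⟨r0, s0, by simp [hlt], hr0⟩
      simp only [List.foldl]
      exact ih hfind _ hinv

-- main lemma: A's pref loop equals the projection of B's fold
lemma pvMain (ps : List String) (ks : List String) :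
    pvAPrefLoop ps (ks.map (fun k => (k, PySem.Str.lower k))) =
      (ks.foldl (pvBStep ps) none).map (·.2) := by
  induction ps with
  | nil => simp [pvAPrefLoop, pvFold_nil]
  | cons p ps ih =>
    simp only [pvAPrefLoop, pvAScan_eq_find]
    cases hf : ks.find? (pvCond p) with
    | some k0 =>
      rw [pvFold_zero p ps ks k0 hf none (Or.inl rfl)]
      rfl
    | none =>
      have hall : ∀ k ∈ ks, pvCond p k = false := by
        intro k hk
        have := List.find?_eq_none.mp hf k hk
        simpa using this
      have := pvFold_shift p ps ks hall none
      simp only [pvShift, Option.map_none] at this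
      rw [this, ih]
      cases ks.foldl (pvBStep ps) none <;> rfl

-- ===== VERDICT (by name: the statement is the Claim_ definition above) =====
theorem pick_rate_col_spec : Claim_equal_pick_rate_col := by
  intro headers _
  unfold Spec_pick_rate_col pick_rate_col pick_rate_col_alt
  simp only [pvZipSelf, pvMain, pvAFallback_eq_find]
  cases (headers.map PySem.Str.strip).foldl (pvBStep pvPrefs) none <;> rfl
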